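-- pv_equiv track=rewrite | github.com/aniuli21/Tema-Retele | src/udp_server.py | calculeaza_checksum
-- ===== SOURCE A (Python) =====
-- def calculeaza_checksum(mesaj_binar):
--     '''
--         TODO: scrieti o functie care primeste un mesaj raw de bytes
--         si calculeaza checksum pentru UDP
--         exemplu de calcul aici:
--         https://www.securitynik.com/2015/08/calculating-udp-checksum-with-taste-of.html
--     '''
--     suma = 0
--
--     # every two bytes
--     for i in range(0, len(mesaj_binar) - 1, 2):
--         cuvant = ord(mesaj_binar[i]) + (ord(mesaj_binar[i+1]) << 8)
--         suma = suma + cuvant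
--     if len(mesaj_binar) % 2 == 1:
--         suma += ord(mesaj_binar[len(mesaj_binar) - 1])
--     # restul peste 16 se aduna cu numarul trimmed la 16 biti and-ul face un 111 de 16 biti iar in rest pune 0
--     while (suma >> 16):
--         suma = (suma >> 16) + (suma & 0xffff)
--     # complementare si trim la 16 biti
--     return ~suma & 0xffff
-- ===== SOURCE B (Python) =====
-- def calculeaza_checksum(mesaj_binar):
--     # one pass: each byte weighted by 256 at odd positions, then fold carries
--     # with the closed form  (-suma) mod 0xFFFF  (empty/zero sum complements to 0xFFFF)
--     suma = sum(ord(c) << (8 * (i % 2)) for i, c in enumerate(mesaj_binar))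
--     if suma == 0:
--         return 0xFFFF
--     return (-suma) % 0xFFFF
-- ===== Notes on version B (the rewrite author's own statement) =====
-- stated objective: alternative
-- what changed: A's index-pair loop plus trailing-byte special case becomes one weighted pass over enumerate(mesaj_binar), and A's carry-folding while-loop is replaced by the closed form (-suma) % 0xFFFF (with 0xFFFF for the zero sum).
import Mathlib
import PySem

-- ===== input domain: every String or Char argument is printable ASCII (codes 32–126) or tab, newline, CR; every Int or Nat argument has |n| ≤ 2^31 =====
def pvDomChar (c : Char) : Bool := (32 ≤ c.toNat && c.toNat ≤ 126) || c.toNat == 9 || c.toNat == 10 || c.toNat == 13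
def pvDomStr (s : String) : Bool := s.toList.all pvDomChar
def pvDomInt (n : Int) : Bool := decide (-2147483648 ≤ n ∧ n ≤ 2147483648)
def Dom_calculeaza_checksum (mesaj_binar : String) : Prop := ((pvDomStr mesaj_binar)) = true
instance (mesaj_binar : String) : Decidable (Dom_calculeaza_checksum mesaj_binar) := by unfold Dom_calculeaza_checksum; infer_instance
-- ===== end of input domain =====

-- B replaces A's index-pair loop by a single weighted pass and A's carry-folding
-- while-loop by the closed form (-suma) mod 0xFFFF; alternative decomposition, same cost.

-- ===== PORT A =====
-- two facts the termination proof of A's while-loop needs (cited in decreasing_by)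
theorem pv_shr16 (s : Int) : s >>> (16 : Nat) = s / 65536 := by
  have h := Int.shiftRight_eq_div_pow s 16
  norm_num at h
  exact h

theorem pv_band_mask (s : Int) : PySem.Int.band s 65535 = s % 65536 := by
  unfold PySem.Int.band
  by_cases hs : 0 ≤ s
  · rw [if_pos hs, if_pos (show (0:Int) ≤ 65535 by norm_num)]
    have h := Nat.and_two_pow_sub_one_eq_mod s.toNat 16
    norm_num at h
    rw [show ((65535:Int).toNat) = 65535 from rfl, h]
    omega
  · rw [if_neg hs, if_pos (show (0:Int) ≤ 65535 by norm_num)]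
    have h : ∀ x : Nat, x &&& 65535 = x % 65536 := by
      intro x
      have hx := Nat.and_two_pow_sub_one_eq_mod x 16
      norm_num at hx
      exact hx
    rw [show ((65535:Int).toNat) = 65535 from rfl, Nat.and_comm, h]
    omega

-- the while-loop of A: while (suma >> 16): suma = (suma >> 16) + (suma & 0xffff)
def pvCarryFold (suma : Int) : Int :=
  if h : suma >>> (16 : Nat) ≠ 0 then
    pvCarryFold ((suma >>> (16 : Nat)) + PySem.Int.band suma 0xffff)
  else suma
termination_by (if suma < 0 then suma.natAbs + 70000 else suma.toNat)
decreasing_by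
  simp only [pv_shr16, pv_band_mask] at h ⊢
  split_ifs <;> omega

def calculeaza_checksum (mesaj_binar : String) : Int :=
  let xs := mesaj_binar.toList
  let n : Int := PySem.Str.len mesaj_binar
  let suma : Int := (PySem.List.pyRange 0 (n - 1) 2).foldl
    (fun suma i =>
      let cuvant : Int := ((PySem.List.pyGetD xs i ' ').toNat : Int)
        + (((PySem.List.pyGetD xs (i + 1) ' ').toNat : Int) <<< (8 : Nat))
      suma + cuvant) 0
  let suma : Int :=
    if PySem.Int.mod n 2 = 1 then suma + ((PySem.List.pyGetD xs (n - 1) ' ').toNat : Int)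
    else suma
  PySem.Int.band (Int.not (pvCarryFold suma)) 0xffff

-- ===== PORT B =====
def calculeaza_checksum_alt (mesaj_binar : String) : Int :=
  let suma : Int := ((PySem.List.enumerate mesaj_binar.toList 0).map
    (fun p => ((p.2.toNat : Int)) <<< (8 * (PySem.Int.mod p.1 2)).toNat)).sum
  if suma = 0 then 0xffff
  else PySem.Int.mod (-suma) 0xffff

-- ===== PRECONDITION & SPEC =====
def Spec_calculeaza_checksum (mesaj_binar : String) (out : Int) : Prop := out = calculeaza_checksum_alt mesaj_binar
instance (mesaj_binar : String) (out : Int) : Decidable (Spec_calculeaza_checksum mesaj_binar out) := by unfold Spec_calculeaza_checksum; infer_instance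

-- ===== CLAIM (what is proved, stated in full; the proofs are below) =====
def Claim_equal_calculeaza_checksum : Prop := ∀ (mesaj_binar : String), Dom_calculeaza_checksum mesaj_binar → Spec_calculeaza_checksum mesaj_binar (calculeaza_checksum mesaj_binar)

-- ===== LEMMAS AND PROOFS =====

-- the common pairing sum both programs compute: low byte + 256 * high byte, two at a time
def pvS : List Int → Int
  | [] => 0
  | [a] => a
  | a :: b :: t => a + b * 256 + pvS t

theorem pvS_nonneg (bs : List Int) (h : ∀ x ∈ bs, 0 ≤ x) : 0 ≤ pvS bs := by
  match bs with
  | [] => simp [pvS]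
  | [a] => simpa [pvS] using h a (by simp)
  | a :: b :: t =>
    have ha := h a (by simp)
    have hb := h b (by simp)
    have ht := pvS_nonneg t (fun x hx => h x (by simp [hx]))
    simp only [pvS]; nlinarith

theorem pv_not_eq (r : Int) : Int.not r = -r - 1 := by
  cases r with
  | ofNat n => simp [Int.not, Int.negSucc_eq]; omega
  | negSucc n => simp [Int.not, Int.negSucc_eq]

-- B's weighted single pass equals the pairing sum (start index of even parity)
theorem pvEnumSum (cs : List Char) (s : Int) (hs : 0 ≤ s) (h2 : s % 2 = 0) :
    ((PySem.List.enumerate cs s).map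
      (fun p => ((p.2.toNat : Int)) <<< (8 * (PySem.Int.mod p.1 2)).toNat)).sum
    = pvS (cs.map (fun c => (c.toNat : Int))) := by
  match cs with
  | [] => simp [PySem.List.enumerate_nil, pvS]
  | [a] =>
    simp [PySem.List.enumerate_cons, PySem.List.enumerate_nil, h2, pvS,
      Int.shiftLeft_eq]
  | a :: b :: t =>
    have hma : PySem.Int.mod s 2 = 0 := by
      rw [PySem.Int.mod_eq_emod_of_pos (by norm_num)]; exact h2
    have hmb : PySem.Int.mod (s + 1) 2 = 1 := by
      rw [PySem.Int.mod_eq_emod_of_pos (by norm_num)]; omega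
    have ih := pvEnumSum t (s + 2) (by omega) (by omega)
    simp only [PySem.List.enumerate_cons, List.map_cons, List.sum_cons,
      show s + 1 + 1 = s + 2 by ring, ih, hma, hmb, List.map, pvS]
    rw [Int.shiftLeft_eq, Int.shiftLeft_eq]
    rw [show ((8 * (0:Int)).toNat) = 0 from rfl, show ((8 * (1:Int)).toNat) = 8 from rfl]
    ring
termination_by cs.length

-- A's index-pair loop (as a range sum) plus its trailing odd byte equals the pairing sum
theorem pvRangeSum (cs : List Char) :
    (((List.range (cs.length / 2)).map (fun k =>
        ((cs.getD (2 * k) ' ').toNat : Int) + ((cs.getD (2 * k + 1) ' ').toNat : Int) * 256)).sum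
      + (if cs.length % 2 = 1 then ((cs.getD (cs.length - 1) ' ').toNat : Int) else 0))
    = pvS (cs.map (fun c => (c.toNat : Int))) := by
  match cs with
  | [] => simp [pvS]
  | [a] => simp [pvS]
  | a :: b :: t =>
    have hlen : (a :: b :: t).length / 2 = t.length / 2 + 1 := by simp; omega
    have hmod : (a :: b :: t).length % 2 = t.length % 2 := by simp; omega
    have ih := pvRangeSum t
    rw [hlen, hmod, List.range_succ_eq_map]
    simp only [List.map_cons, List.sum_cons, List.map_map]
    have hmap : (List.range (t.length / 2)).map ((fun k =>
          (((a :: b :: t).getD (2 * k) ' ').toNat : Int)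
            + (((a :: b :: t).getD (2 * k + 1) ' ').toNat : Int) * 256) ∘ Nat.succ)
        = (List.range (t.length / 2)).map (fun k =>
          ((t.getD (2 * k) ' ').toNat : Int) + ((t.getD (2 * k + 1) ' ').toNat : Int) * 256) := by
      apply List.map_congr_left
      intro k _
      have h1 : 2 * Nat.succ k = (2 * k + 1) + 1 := by omega
      simp [Function.comp, h1]
    rw [hmap]
    have htr : (if t.length % 2 = 1 then (((a :: b :: t).getD ((a :: b :: t).length - 1) ' ').toNat : Int) else 0)
        = (if t.length % 2 = 1 then ((t.getD (t.length - 1) ' ').toNat : Int) else 0) := by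
      by_cases hp : t.length % 2 = 1
      · obtain ⟨m, hm⟩ : ∃ m, t.length = m + 1 := ⟨t.length - 1, by omega⟩
        simp [hm]
      · simp [hp]
    rw [htr]
    rw [show ((a :: b :: t).getD (2 * 0) ' ') = a from rfl,
        show ((a :: b :: t).getD (2 * 0 + 1) ' ') = b from rfl]
    simp only [pvS]
    omega
termination_by cs.length

-- the carry-folding while-loop, in closed form (for the nonnegative sums it is run on)
theorem pvCarryFold_eq (s : Int) (hs : 0 ≤ s) :
    pvCarryFold s = if s % 65535 = 0 then (if s = 0 then 0 else 65535) else s % 65535 := by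
  rw [pvCarryFold]
  by_cases h : s >>> (16 : Nat) ≠ 0
  · rw [dif_pos h]
    rw [pv_shr16] at h ⊢
    rw [pv_band_mask]
    have hge : 65536 ≤ s := by omega
    have ih := pvCarryFold_eq (s / 65536 + s % 65536) (by omega)
    rw [ih]
    split_ifs <;> omega
  · rw [dif_neg h]
    rw [pv_shr16] at h
    split_ifs <;> omega
termination_by s.toNat
decreasing_by
  rw [pv_shr16] at h
  omega

-- A's fold-and-sum pipeline, rewritten to the range-sum shape of pvRangeSum
theorem pvA_sum (m : String) :
    (if PySem.Int.mod (PySem.Str.len m) 2 = 1 then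
        (PySem.List.pyRange 0 (PySem.Str.len m - 1) 2).foldl
          (fun suma i => suma + (((PySem.List.pyGetD m.toList i ' ').toNat : Int)
            + (((PySem.List.pyGetD m.toList (i + 1) ' ').toNat : Int) <<< (8 : Nat)))) 0
          + ((PySem.List.pyGetD m.toList (PySem.Str.len m - 1) ' ').toNat : Int)
      else
        (PySem.List.pyRange 0 (PySem.Str.len m - 1) 2).foldl
          (fun suma i => suma + (((PySem.List.pyGetD m.toList i ' ').toNat : Int)
            + (((PySem.List.pyGetD m.toList (i + 1) ' ').toNat : Int) <<< (8 : Nat)))) 0)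
    = pvS (m.toList.map (fun c => (c.toNat : Int))) := by
  rw [PySem.Str.len_eq]
  have hcond : (PySem.Int.mod ((m.toList.length : Int)) 2 = 1) ↔ (m.toList.length % 2 = 1) := by
    rw [PySem.Int.mod_eq_emod_of_pos (by norm_num)]; omega
  have hF : (PySem.List.pyRange 0 ((m.toList.length : Int) - 1) 2).foldl
      (fun suma i => suma + (((PySem.List.pyGetD m.toList i ' ').toNat : Int)
        + (((PySem.List.pyGetD m.toList (i + 1) ' ').toNat : Int) <<< (8 : Nat)))) 0
      = ((List.range (m.toList.length / 2)).map (fun k =>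
          ((m.toList.getD (2 * k) ' ').toNat : Int)
            + ((m.toList.getD (2 * k + 1) ' ').toNat : Int) * 256)).sum := by
    rw [PySem.List.foldl_add, PySem.List.pyRange_of_pos 0 ((m.toList.length : Int) - 1)
      (by norm_num), List.map_map, zero_add]
    have hC : (if (0:Int) < (m.toList.length : Int) - 1
        then ((((m.toList.length : Int) - 1 - 0 + 2 - 1)) / 2).toNat else 0)
        = m.toList.length / 2 := by
      split_ifs <;> omega
    rw [hC]
    apply congrArg List.sum
    apply List.map_congr_left
    intro k _
    have e1 : ((2:Int) * (k : Int)) = ((2 * k : Nat) : Int) := by push_cast; ring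
    have e2 : (((2 * k : Nat) : Int) + 1) = ((2 * k + 1 : Nat) : Int) := by push_cast; ring
    simp only [Function.comp_apply, e1, zero_add, e2]
    rw [PySem.List.pyGetD_natCast, PySem.List.pyGetD_natCast]
    rw [Int.shiftLeft_eq]
    norm_num
  rw [hF]
  by_cases hp : m.toList.length % 2 = 1
  · rw [if_pos (hcond.mpr hp)]
    have e3 : ((m.toList.length : Int) - 1) = ((m.toList.length - 1 : Nat) : Int) := by omega
    rw [e3, PySem.List.pyGetD_natCast]
    have h := pvRangeSum m.toList
    rw [if_pos hp] at h
    exact h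
  · rw [if_neg (fun hx => hp (hcond.mp hx))]
    have h := pvRangeSum m.toList
    rw [if_neg hp, add_zero] at h
    exact h

-- arithmetic of the complement step: both tails agree once suma is the same nonneg value
theorem pvFinal (S : Int) (hS : 0 ≤ S) :
    PySem.Int.band (Int.not (pvCarryFold S)) 0xffff
      = (if S = 0 then 0xffff else PySem.Int.mod (-S) 0xffff) := by
  rw [pvCarryFold_eq S hS, PySem.Int.mod_eq_emod_of_pos (by norm_num)]
  rw [pv_not_eq, pv_band_mask]
  split_ifs <;> omega

-- ===== VERDICT (by name: the statement is the Claim_ definition above) =====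
theorem calculeaza_checksum_spec : Claim_equal_calculeaza_checksum := by
  intro m _
  unfold Spec_calculeaza_checksum
  show calculeaza_checksum m = calculeaza_checksum_alt m
  simp only [calculeaza_checksum, calculeaza_checksum_alt]
  rw [pvEnumSum m.toList 0 (by norm_num) (by norm_num)]
  rw [pvA_sum m]
  exact pvFinal _ (pvS_nonneg _ (by
    intro x hx
    simp only [List.mem_map] at hx
    obtain ⟨c, _, rfl⟩ := hx
    positivity))
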